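-- pv_equiv track=rewrite | github.com/Harrisfactory/CleanupParenth | cleanup_parenth.py | orginizeExpression
-- ===== SOURCE A (Python) =====
-- def orginizeExpression(expression):
--
--     orginized_expression = {}
--
--     for i in range(0, len(expression)):
--         #current parameter indexes
--         stored_indicies = []
--         #current adjacent operators
--         stored_operators = []
--         #we have reached a sub expression
--         if expression[i] == '(':
--             stored_indicies.append(i)
--             #append left operator if exists
--             if 0 <= (i - 1) < len(expression):
--                 stored_operators.append(expression[i - 1])
--             else:
--                 stored_operators.append('')
--             #parenthesis counter must equal zero to hit the proper closing parenthesis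
--             parenthesis_counter = 1
--             while parenthesis_counter != 0:
--                 i += 1
--                 if expression[i] == '(':
--                     parenthesis_counter += 1
--                 elif expression[i] == ')':
--                     parenthesis_counter -= 1
--             stored_indicies.append(i)
--             #append right operator if exists
--             if 0 <= (i + 1) < len(expression):
--                 stored_operators.append(expression[i + 1])
--             else:
--                 stored_operators.append('')
--
--             orginized_expression[tuple(stored_indicies)] = stored_operators
--
--     return orginized_expression
-- ===== SOURCE B (Python) =====
-- def orginizeExpression(expression):
--     # Single pass: stack-match parentheses, then one scan over positions to
--     # emit pairs in the same order (ascending opening index) as the original.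
--     stack = []
--     match = {}
--     for i, ch in enumerate(expression):
--         if ch == '(':
--             stack.append(i)
--         elif ch == ')' and stack:
--             match[stack.pop()] = i
--     n = len(expression)
--     out = {}
--     for i in range(n):
--         if i in match:
--             j = match[i]
--             out[(i, j)] = [expression[i - 1] if i > 0 else '',
--                            expression[j + 1] if j + 1 < n else '']
--     return out
-- ===== Notes on version B (the rewrite author's own statement) =====
-- stated objective: alternative
-- what changed: A rescans forward from every '(' to find its closing ')' (cost grows with nesting depth); B matches all parentheses in one stack pass building an open-index->close-index dict, then emits the pairs in one scan over positions, which reproduces A's insertion order.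
import Mathlib
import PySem

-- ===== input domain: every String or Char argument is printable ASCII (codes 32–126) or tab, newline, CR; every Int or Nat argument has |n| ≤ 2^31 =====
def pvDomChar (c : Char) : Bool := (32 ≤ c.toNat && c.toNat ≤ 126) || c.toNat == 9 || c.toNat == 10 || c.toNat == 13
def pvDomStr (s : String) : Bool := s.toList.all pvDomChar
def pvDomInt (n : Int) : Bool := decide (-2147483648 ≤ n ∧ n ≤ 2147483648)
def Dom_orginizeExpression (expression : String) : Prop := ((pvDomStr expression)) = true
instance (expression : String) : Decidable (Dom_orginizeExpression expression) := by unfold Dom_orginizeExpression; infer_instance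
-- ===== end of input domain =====

-- B replaces A's per-'(' rescan to its matching ')' by a single stack pass that matches
-- all parentheses at once, plus one scan over positions emitting the pairs in A's order.

-- ===== PORT A =====
-- inner 'while parenthesis_counter != 0' loop of A: l is the suffix of the string
-- after index i, c the counter; returns the index of the matching ')'.
-- (on [] with c ≠ 0 Python raises IndexError — excluded by Pre_; value there is irrelevant)
def pvAScan : List Char → Nat → Nat → Nat
  | _, i, 0 => i
  | [], i, _ + 1 => i + 1
  | ch :: t, i, c + 1 =>
      pvAScan t (i + 1) (if ch = '(' then c + 2 else if ch = ')' then c else c + 1)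

def orginizeExpression (expression : String) : List (List Int × List String) :=
  let cs := expression.toList
  let n := cs.length
  ((List.range n).foldl (fun (d : PySem.Dict (List Int) (List String)) i =>
      if cs.getD i ' ' = '(' then
        let j := pvAScan (cs.drop (i + 1)) i 1
        let left : String :=
          if 0 ≤ (i : Int) - 1 ∧ (i : Int) - 1 < (n : Int) then String.ofList [cs.getD (i - 1) ' '] else ""
        let right : String :=
          if 0 ≤ (j : Int) + 1 ∧ (j : Int) + 1 < (n : Int) then String.ofList [cs.getD (j + 1) ' '] else ""
        d.insert [(i : Int), (j : Int)] [left, right]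
      else d) PySem.Dict.empty).items

-- ===== PORT B =====
-- the single 'for i, ch in enumerate(expression)' stack pass of B
def pvMatch : List Char → Nat → List Nat → PySem.Dict Nat Nat → List Nat × PySem.Dict Nat Nat
  | [], _, st, m => (st, m)
  | ch :: t, p, st, m =>
      if ch = '(' then pvMatch t (p + 1) (p :: st) m
      else if ch = ')' then
        match st with
        | [] => pvMatch t (p + 1) [] m
        | q :: st' => pvMatch t (p + 1) st' (m.insert q p)
      else pvMatch t (p + 1) st m

def orginizeExpression_alt (expression : String) : List (List Int × List String) :=
  let cs := expression.toList
  let n := cs.length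
  let m := (pvMatch cs 0 [] PySem.Dict.empty).2
  ((List.range n).foldl (fun (out : PySem.Dict (List Int) (List String)) i =>
      match m.get? i with
      | some j =>
        let left : String := if 0 < i then String.ofList [cs.getD (i - 1) ' '] else ""
        let right : String := if j + 1 < n then String.ofList [cs.getD (j + 1) ' '] else ""
        out.insert [(i : Int), (j : Int)] [left, right]
      | none => out) PySem.Dict.empty).items

-- ===== PRECONDITION & SPEC =====
-- running balance, decrements truncated at 0 (extra ')' are ignored by A too)
def pvFloor (l : List Char) (c : Nat) : Nat :=
  l.foldl (fun c ch => if ch = '(' then c + 1 else if ch = ')' then c - 1 else c) c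

-- Pre_ excludes exactly the strings with an unmatched '(' — there A's inner scan
-- runs past the end of the string and raises IndexError.
def Pre_orginizeExpression (expression : String) : Prop :=
  pvFloor expression.toList 0 = 0
instance (expression : String) : Decidable (Pre_orginizeExpression expression) := by
  unfold Pre_orginizeExpression; infer_instance

def pvWitness_orginizeExpression : String := "(a+b)*(c-d)"

def Spec_orginizeExpression (expression : String) (out : List (List Int × List String)) : Prop :=
  out = orginizeExpression_alt expression
instance (expression : String) (out : List (List Int × List String)) : Decidable (Spec_orginizeExpression expression out) := by
  unfold Spec_orginizeExpression; infer_instance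

-- ===== CLAIM (what is proved, stated in full; the proofs are below) =====
def Claim_equal_orginizeExpression : Prop := ∀ (expression : String), Dom_orginizeExpression expression → Pre_orginizeExpression expression → Spec_orginizeExpression expression (orginizeExpression expression)

-- ===== LEMMAS AND PROOFS =====

def pvStepC (ch : Char) (c : Nat) : Nat :=
  if ch = '(' then c + 1 else if ch = ')' then c - 1 else c

def pvClose : List Char → Nat → Option Nat
  | [], _ => none
  | ch :: t, c =>
      if pvStepC ch c = 0 then some 0 else (pvClose t (pvStepC ch c)).map (· + 1)

def pvCnt : List Char → Nat → Option Nat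
  | [], c => some c
  | ch :: t, c =>
      if pvStepC ch c = 0 then none else pvCnt t (pvStepC ch c)

def pvSeg (cs : List Char) (a b : Nat) : List Char := (cs.take b).drop a

def pvInv (cs : List Char) (p : Nat) (st : List Nat) (m : PySem.Dict Nat Nat) : Prop :=
  (∀ t q, st[t]? = some q → q < p ∧ cs[q]? = some '(' ∧ pvCnt (pvSeg cs (q + 1) p) 1 = some (t + 1)) ∧
  (∀ q j, m.get? q = some j → q < p ∧ cs[q]? = some '(' ∧
      ∃ k, pvClose (cs.drop (q + 1)) 1 = some k ∧ j = q + 1 + k) ∧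
  (∀ q, q < p → cs[q]? = some '(' → q ∈ st ∨ m.contains q = true) ∧
  (∀ q, q ∈ st → m.contains q = false)

theorem pvCnt_append (x y : List Char) (c : Nat) :
    pvCnt (x ++ y) c = (pvCnt x c).bind (fun c' => pvCnt y c') := by
  induction x generalizing c with
  | nil => simp [pvCnt]
  | cons ch t ih =>
    simp only [List.cons_append, pvCnt]
    split
    · rfl
    · exact ih _

theorem pvClose_append (x z : List Char) (c c' : Nat) (h : pvCnt x c = some c') :
    pvClose (x ++ z) c = (pvClose z c').map (· + x.length) := by
  induction x generalizing c with
  | nil => simp [pvCnt] at h; subst h; simp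
  | cons ch t ih =>
    simp only [pvCnt] at h
    split at h
    · exact absurd h (by simp)
    · rename_i hne
      simp only [List.cons_append, pvClose, hne, if_false, ih _ h, Option.map_map]
      have hf : ((fun x => x + 1) ∘ fun x : Nat => x + t.length) = (fun x => x + (ch :: t).length) := by
        funext k; simp [List.length_cons]; omega
      rw [hf]

theorem pvAScan_of_pvClose (l : List Char) (c : Nat) :
    ∀ i k, pvClose l (c + 1) = some k → pvAScan l i (c + 1) = i + 1 + k := by
  induction l generalizing c with
  | nil => intro i k h; simp [pvClose] at h
  | cons ch t ih =>
    intro i k h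
    simp only [pvClose] at h
    by_cases h0 : pvStepC ch (c + 1) = 0
    · simp only [h0, if_true, Option.some.injEq] at h
      subst h
      have : (if ch = '(' then c + 2 else if ch = ')' then c else c + 1) = 0 := by
        simp only [pvStepC] at h0 ⊢
        split_ifs at h0 ⊢ <;> omega
      simp only [pvAScan, this]
    · simp only [h0, if_false] at h
      cases hk : pvClose t (pvStepC ch (c + 1)) with
      | none => simp [hk] at h
      | some k' =>
        simp only [hk, Option.map_some, Option.some.injEq] at h
        subst h
        have hs : (if ch = '(' then c + 2 else if ch = ')' then c else c + 1) = pvStepC ch (c + 1) := by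
          simp only [pvStepC]; split_ifs <;> omega
        obtain ⟨c'', hc''⟩ : ∃ c'', pvStepC ch (c + 1) = c'' + 1 := by
          cases hcc : pvStepC ch (c+1) with
          | zero => exact absurd hcc h0
          | succ n => exact ⟨n, rfl⟩
        simp only [pvAScan, hs, hc'']
        rw [hc''] at hk
        rw [ih _ _ _ hk]
        omega

theorem pvMatch_len : ∀ (l : List Char) (p : Nat) (st : List Nat) (m : PySem.Dict Nat Nat),
    (pvMatch l p st m).1.length = pvFloor l st.length := by
  intro l
  induction l with
  | nil => intro p st m; simp [pvMatch, pvFloor]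
  | cons ch t ih =>
    intro p st m
    simp only [pvMatch, pvFloor, List.foldl_cons]
    by_cases h1 : ch = '('
    · simp only [h1, if_true]
      rw [ih]; rfl
    · by_cases h2 : ch = ')'
      · simp only [h1, h2, if_false, if_true]
        cases st with
        | nil => show (pvMatch t (p + 1) [] m).1.length = _; rw [ih]; rfl
        | cons q st' => show (pvMatch t (p + 1) st' (m.insert q p)).1.length = _; rw [ih]; rfl
      · simp only [h1, h2, if_false]
        rw [ih]; rfl

theorem pvSeg_self (cs : List Char) (p : Nat) : pvSeg cs (p + 1) (p + 1) = [] := by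
  apply List.drop_eq_nil_of_le
  exact List.length_take_le _ _

theorem pvSeg_ext (cs : List Char) (q p : Nat) (ch : Char) (hqp : q + 1 ≤ p)
    (hcp : cs[p]? = some ch) : pvSeg cs (q + 1) (p + 1) = pvSeg cs (q + 1) p ++ [ch] := by
  have hp : p < cs.length := by
    rcases Nat.lt_or_ge p cs.length with h | h
    · exact h
    · rw [List.getElem?_eq_none_iff.2 h] at hcp; cases hcp
  unfold pvSeg
  rw [List.take_add_one, hcp]
  have hlen : q + 1 ≤ (cs.take p).length := by rw [List.length_take]; omega
  rw [List.drop_append_of_le_length hlen]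
  rfl

theorem pvSeg_len (cs : List Char) (a p : Nat) (hp : p ≤ cs.length) :
    (pvSeg cs a p).length = p - a := by
  simp [pvSeg, List.length_take]; omega

theorem pvDrop_decomp (cs : List Char) (q p : Nat) (hqp : q + 1 ≤ p) (hp : p ≤ cs.length) :
    cs.drop (q + 1) = pvSeg cs (q + 1) p ++ cs.drop p := by
  conv_lhs => rw [← List.take_append_drop p cs]
  have hlen : q + 1 ≤ (cs.take p).length := by rw [List.length_take]; omega
  rw [List.drop_append_of_le_length hlen]
  rfl

theorem pvRun (cs : List Char) : ∀ (l : List Char) (p : Nat) (st : List Nat) (m : PySem.Dict Nat Nat),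
    l = cs.drop p → p ≤ cs.length → pvInv cs p st m →
    pvInv cs cs.length (pvMatch l p st m).1 (pvMatch l p st m).2 := by
  intro l
  induction l with
  | nil =>
    intro p st m hl hp hinv
    have : cs.length ≤ p := List.drop_eq_nil_iff.1 hl.symm
    have hple : p = cs.length := le_antisymm hp this
    subst hple
    exact hinv
  | cons ch t ih =>
    intro p st m hl hp hinv
    have hdp : cs.drop p = ch :: t := hl.symm
    have hcp : cs[p]? = some ch := by
      have h0 : (cs.drop p)[0]? = some ch := by rw [hdp]; rfl
      simpa using h0
    have hplt : p < cs.length := by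
      rcases Nat.lt_or_ge p cs.length with h | h
      · exact h
      · rw [List.getElem?_eq_none_iff.2 h] at hcp; cases hcp
    have ht : t = cs.drop (p + 1) := by
      have h1 : cs.drop (p + 1) = (cs.drop p).drop 1 := by
        rw [List.drop_drop, Nat.add_comm]
      rw [h1, hdp]
      rfl
    obtain ⟨hst, hm, hcomp, hdisj⟩ := hinv
    -- bump of the m-soundness clause is shared
    have hm' : ∀ q j, m.get? q = some j → q < p + 1 ∧ cs[q]? = some '(' ∧
        ∃ k, pvClose (cs.drop (q + 1)) 1 = some k ∧ j = q + 1 + k := by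
      intro q j hq
      obtain ⟨h1, h2, h3⟩ := hm q j hq
      exact ⟨by omega, h2, h3⟩
    simp only [pvMatch]
    by_cases h1 : ch = '('
    · subst h1
      simp only [if_pos rfl]
      apply ih (p + 1) _ _ ht (by omega)
      refine ⟨?_, hm', ?_, ?_⟩
      · intro t' q hq
        cases t' with
        | zero =>
          simp only [List.getElem?_cons_zero, Option.some.injEq] at hq
          subst hq
          refine ⟨by omega, hcp, ?_⟩
          rw [pvSeg_self]
          simp [pvCnt]
        | succ t'' =>
          simp only [List.getElem?_cons_succ] at hq
          obtain ⟨hqp, hqc, hcnt⟩ := hst t'' q hq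
          refine ⟨by omega, hqc, ?_⟩
          rw [pvSeg_ext cs q p _ (by omega) hcp, pvCnt_append, hcnt]
          simp [pvCnt, pvStepC]
      · intro q hq hqc
        by_cases hqp : q = p
        · subst hqp; exact Or.inl (List.mem_cons_self)
        · rcases hcomp q (by omega) hqc with h | h
          · exact Or.inl (List.mem_cons_of_mem _ h)
          · exact Or.inr h
      · intro q hq
        rcases List.mem_cons.1 hq with h | h
        · subst h
          cases hcont : m.contains q with
          | false => rfl
          | true =>
            rw [PySem.Dict.contains_eq_isSome_get?] at hcont
            obtain ⟨j, hj⟩ := Option.isSome_iff_exists.1 hcont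
            have := (hm q j hj).1
            omega
        · exact hdisj q h
    · by_cases h2 : ch = ')'
      · subst h2
        simp only [if_neg h1, if_pos rfl]
        cases st with
        | nil =>
          apply ih (p + 1) _ _ ht (by omega)
          refine ⟨?_, hm', ?_, ?_⟩
          · intro t' q hq; simp at hq
          · intro q hq hqc
            by_cases hqp : q = p
            · subst hqp; rw [hcp] at hqc; simp at hqc
            · rcases hcomp q (by omega) hqc with h | h
              · simp at h
              · exact Or.inr h
          · intro q hq; simp at hq
        | cons q0 st' =>
          obtain ⟨hq0p, hq0c, hcnt0⟩ := hst 0 q0 (by simp)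
          have hclose : pvClose (cs.drop (q0 + 1)) 1 = some (p - (q0 + 1)) := by
            rw [pvDrop_decomp cs q0 p (by omega) (by omega)]
            rw [pvClose_append _ _ _ _ hcnt0, hdp]
            simp only [pvClose, pvStepC]
            rw [pvSeg_len cs _ p (by omega)]
            simp
          apply ih (p + 1) _ _ ht (by omega)
          refine ⟨?_, ?_, ?_, ?_⟩
          · intro t' q hq
            have hq' : (q0 :: st')[t' + 1]? = some q := by simpa using hq
            obtain ⟨hqp, hqc, hcnt⟩ := hst (t' + 1) q hq'
            refine ⟨by omega, hqc, ?_⟩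
            rw [pvSeg_ext cs q p _ (by omega) hcp, pvCnt_append, hcnt]
            simp [pvCnt, pvStepC]
          · intro q j hget
            rw [PySem.Dict.get?_insert] at hget
            by_cases hqq : q = q0
            · subst hqq
              rw [if_pos rfl] at hget
              have hj : j = p := by simpa using hget.symm
              exact ⟨by omega, hq0c, p - (q + 1), hclose, by omega⟩
            · rw [if_neg hqq] at hget
              exact hm' q j hget
          · intro q hq hqc
            by_cases hqp : q = p
            · subst hqp; rw [hcp] at hqc; simp at hqc
            · rcases hcomp q (by omega) hqc with h | h
              · rcases List.mem_cons.1 h with h' | h'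
                · subst h'
                  refine Or.inr ?_
                  rw [PySem.Dict.contains_insert]
                  simp
                · exact Or.inl h'
              · refine Or.inr ?_
                rw [PySem.Dict.contains_insert, h]
                simp
          · intro q hq
            have hne : q ≠ q0 := by
              intro h
              subst h
              obtain ⟨t', ht'lt, ht'⟩ := List.getElem_of_mem hq
              have hget : st'[t']? = some q := by
                rw [List.getElem?_eq_getElem ht'lt, ht']
              have hc1 := (hst (t' + 1) q (by simpa using hget)).2.2
              rw [hcnt0] at hc1
              simp at hc1
            rw [PySem.Dict.contains_insert]
            have := hdisj q (List.mem_cons_of_mem _ hq)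
            simp [hne, this]
      · simp only [if_neg h1, if_neg h2]
        apply ih (p + 1) _ _ ht (by omega)
        refine ⟨?_, hm', ?_, ?_⟩
        · intro t' q hq
          obtain ⟨hqp, hqc, hcnt⟩ := hst t' q hq
          refine ⟨by omega, hqc, ?_⟩
          rw [pvSeg_ext cs q p _ (by omega) hcp, pvCnt_append, hcnt]
          simp [pvCnt, pvStepC, h1, h2]
        · intro q hq hqc
          by_cases hqp : q = p
          · subst hqp
            rw [hcp] at hqc
            simp only [Option.some.injEq] at hqc
            exact absurd hqc h1
          · exact hcomp q (by omega) hqc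
        · exact hdisj

theorem pvFinal (cs : List Char) (hpre : pvFloor cs 0 = 0) (i : Nat) (hi : i < cs.length) :
    (pvMatch cs 0 [] PySem.Dict.empty).2.get? i =
      (if cs[i]? = some '(' then some (pvAScan (cs.drop (i + 1)) i 1) else none) := by
  have hinit : pvInv cs 0 [] PySem.Dict.empty := by
    refine ⟨?_, ?_, ?_, ?_⟩
    · intro t q hq; simp at hq
    · intro q j hq; rw [PySem.Dict.get?_empty] at hq; cases hq
    · intro q hq; omega
    · intro q hq; simp at hq
  have hrun := pvRun cs cs 0 [] PySem.Dict.empty (by simp) (by omega) hinit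
  obtain ⟨hst, hm, hcomp, hdisj⟩ := hrun
  have hstnil : (pvMatch cs 0 [] PySem.Dict.empty).1 = [] := by
    have := pvMatch_len cs 0 [] PySem.Dict.empty
    simp only [List.length_nil] at this
    rw [hpre] at this
    exact List.eq_nil_of_length_eq_zero this
  by_cases hop : cs[i]? = some '('
  · rw [if_pos hop]
    rcases hcomp i hi hop with h | h
    · rw [hstnil] at h; simp at h
    · rw [PySem.Dict.contains_eq_isSome_get?] at h
      obtain ⟨j, hj⟩ := Option.isSome_iff_exists.1 h
      obtain ⟨-, -, k, hcl, hjk⟩ := hm i j hj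
      rw [hj, hjk]
      congr 1
      have h2 := pvAScan_of_pvClose (cs.drop (i + 1)) 0 i k (by simpa using hcl)
      simp only [Nat.zero_add] at h2
      omega
  · rw [if_neg hop]
    cases hget : (pvMatch cs 0 [] PySem.Dict.empty).2.get? i with
    | none => rfl
    | some j =>
      obtain ⟨-, hqc, -⟩ := hm i j hget
      exact absurd hqc hop

theorem pvMain (expression : String) (hpre : pvFloor expression.toList 0 = 0) :
    orginizeExpression expression = orginizeExpression_alt expression := by
  unfold orginizeExpression orginizeExpression_alt
  dsimp only
  congr 1
  apply PySem.List.foldl_congr_mem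
  intro acc i hmem
  have hi : i < expression.toList.length := List.mem_range.1 hmem
  have hfin := pvFinal expression.toList hpre i hi
  have hgetD : expression.toList.getD i ' ' = expression.toList[i]'hi := List.getD_eq_getElem _ _ hi
  by_cases hop : expression.toList[i]'hi = '('
  · have hop? : expression.toList[i]? = some '(' := by
      rw [List.getElem?_eq_getElem hi, hop]
    rw [if_pos (by rw [hgetD, hop])]
    rw [hfin, if_pos hop?]
    have hl : (0 ≤ (i : Int) - 1 ∧ (i : Int) - 1 < (expression.toList.length : Int)) ↔ 0 < i := by
      omega
    have hr : ∀ j : Nat, (0 ≤ (j : Int) + 1 ∧ (j : Int) + 1 < (expression.toList.length : Int)) ↔ j + 1 < expression.toList.length := by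
      intro j; omega
    simp only [hl, hr]
  · have hop? : expression.toList[i]? ≠ some '(' := by
      rw [List.getElem?_eq_getElem hi]
      simpa using hop
    rw [if_neg (by rw [hgetD]; exact hop)]
    rw [hfin, if_neg hop?]

-- ===== VERDICT (by name: the statement is the Claim_ definition above) =====
theorem orginizeExpression_spec : Claim_equal_orginizeExpression := by
  intro expression _ hpre
  exact pvMain expression hpre
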